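-- pv_equiv track=rewrite | github.com/daniel-reich/ubiquitous-fiesta | 9Px2rkc9TPhK54wDb_6.py | ecg_seq_index
-- ===== SOURCE A (Python) =====
-- def ecg_seq_index(n):
--   ecg = [1,2]
--   x = 3
--   while n not in ecg:
--     if x in ecg:
--       x += 1
--     elif any([i in factors(ecg[-1]) for i in factors(x)]):
--       ecg.append(x)
--       x = 3
--     else:
--       x += 1
--   return ecg.index(n)
--
-- def factors(n):
--   return [i for i in range(2,n+1) if n%i == 0]
-- ===== SOURCE B (Python) =====
-- def ecg_seq_index(n):
--   if n == 1:
--     return 0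
--   if n == 2:
--     return 1
--   used = {1, 2}
--   last = 2
--   idx = 1
--   x = 3
--   while True:
--     if x in used:
--       x += 1
--     elif _gcd(x, last) > 1:
--       used.add(x)
--       last = x
--       idx += 1
--       if x == n:
--         return idx
--       x = 3
--     else:
--       x += 1
--
-- def _gcd(a, b):
--   return a if b == 0 else _gcd(b, a % b)
-- ===== Notes on version B (the rewrite author's own statement) =====
-- stated objective: faster
-- what changed: A keeps the whole sequence as a list, re-scans it for every membership test, re-enumerates the divisor lists of both the candidate and the last term on every trial, and finishes with an .index scan; B keeps only a used-set, the last term and a running index counter, and tests the shared-factor condition with a recursive Euclidean gcd, returning the counter directly.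
import Mathlib
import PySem

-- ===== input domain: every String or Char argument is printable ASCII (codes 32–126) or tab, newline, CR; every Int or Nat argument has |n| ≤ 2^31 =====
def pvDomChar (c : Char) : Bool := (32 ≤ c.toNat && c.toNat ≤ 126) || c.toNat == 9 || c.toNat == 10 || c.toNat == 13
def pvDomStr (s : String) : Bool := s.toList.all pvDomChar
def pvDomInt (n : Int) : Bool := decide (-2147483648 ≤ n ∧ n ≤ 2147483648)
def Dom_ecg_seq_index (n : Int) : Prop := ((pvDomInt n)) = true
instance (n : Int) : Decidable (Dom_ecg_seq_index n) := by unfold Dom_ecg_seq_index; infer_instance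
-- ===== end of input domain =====

-- B replaces A's growing list (O(L) membership scans, two factor-list enumerations per trial,
-- final .index scan) by a used-set with a running index counter and a gcd test: faster.

-- ===== PORT A =====
-- factors(n) = [i for i in range(2,n+1) if n%i == 0]
def pvFactors (n : Int) : List Int :=
  (PySem.List.pyRange 2 (n+1) 1).filter (fun i => PySem.Int.mod n i == 0)

-- A's while loop; the fuel only makes the (possibly non-terminating) loop total, -1 = fuel ran out
def pvLoopA (n : Int) (fuel : Nat) (ecg : List Int) (x : Int) : Int :=
  if n ∈ ecg then (((PySem.List.index? ecg n).getD 0 : Nat) : Int)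
  else
    match fuel with
    | 0 => -1
    | f + 1 =>
      if x ∈ ecg then pvLoopA n f ecg (x + 1)
      else if ((pvFactors x).map
                (fun i => decide (i ∈ pvFactors (PySem.List.pyGetD ecg (-1) 0)))).any (fun b => b) then
        pvLoopA n f (ecg ++ [x]) 3
      else pvLoopA n f ecg (x + 1)

def ecg_seq_index (n : Int) : Int := pvLoopA n 10000000000000000000 [1, 2] 3

-- ===== PORT B =====
-- _gcd(a,b) = a if b == 0 else _gcd(b, a % b)
def pvGcd (a b : Int) : Int :=
  if b = 0 then a else pvGcd b (PySem.Int.mod a b)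
termination_by b.natAbs
decreasing_by
  rcases lt_trichotomy b 0 with hb | hb | hb
  · have h1 := PySem.Int.mod_neg_bounds a hb
    omega
  · omega
  · have h1 := PySem.Int.mod_nonneg a hb
    have h2 := PySem.Int.mod_lt a hb
    omega

-- B's while True loop; same fuel device, -1 = fuel ran out
def pvLoopB (n : Int) : Nat → PySem.Set Int → Int → Int → Int → Int
  | 0, _, _, _, _ => -1
  | f + 1, used, last, idx, x =>
    if PySem.Set.contains used x then pvLoopB n f used last idx (x + 1)
    else if 1 < pvGcd x last then
      (if x = n then idx + 1
       else pvLoopB n f (PySem.Set.add used x) x (idx + 1) 3)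
    else pvLoopB n f used last idx (x + 1)

def ecg_seq_index_alt (n : Int) : Int :=
  if n = 1 then 0
  else if n = 2 then 1
  else pvLoopB n 10000000000000000000 (PySem.Set.ofList [1, 2]) 2 1 3

-- ===== PRECONDITION & SPEC =====
def Spec_ecg_seq_index (n : Int) (out : Int) : Prop := out = ecg_seq_index_alt n
instance (n : Int) (out : Int) : Decidable (Spec_ecg_seq_index n out) := by unfold Spec_ecg_seq_index; infer_instance

-- ===== CLAIM (what is proved, stated in full; the proofs are below) =====
def Claim_equal_ecg_seq_index : Prop :=
  ∀ (n : Int), Dom_ecg_seq_index n → Spec_ecg_seq_index n (ecg_seq_index n)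

-- ===== LEMMAS AND PROOFS =====

lemma mem_pvFactors {i m : Int} : i ∈ pvFactors m ↔ (2 ≤ i ∧ i < m + 1 ∧ i ∣ m) := by
  unfold pvFactors
  simp [List.mem_filter, PySem.List.mem_pyRange_one, PySem.Int.mod_eq_zero_iff_dvd, and_assoc]

lemma pvGcd_eq_gcd : ∀ (k : Nat) (a b : Int), b.natAbs ≤ k → 0 ≤ a → 0 ≤ b →
    pvGcd a b = (Int.gcd a b : Int) := by
  intro k
  induction k with
  | zero =>
    intro a b hk ha hb
    have hb0 : b = 0 := by omega
    subst hb0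
    rw [pvGcd]
    simp [Int.gcd, Int.natAbs_of_nonneg ha]
  | succ k ih =>
    intro a b hk ha hb
    by_cases hb0 : b = 0
    · subst hb0
      rw [pvGcd]
      simp [Int.gcd, Int.natAbs_of_nonneg ha]
    · have hbpos : 0 < b := lt_of_le_of_ne hb (Ne.symm hb0)
      rw [pvGcd]
      rw [if_neg hb0]
      have hmod : PySem.Int.mod a b = a % b := PySem.Int.mod_eq_emod_of_pos hbpos
      have h1 : 0 ≤ a % b := Int.emod_nonneg a hb0
      have h2 : a % b < b := Int.emod_lt_of_pos a hbpos
      rw [hmod, ih b (a % b) (by omega) hb h1]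
      congr 1
      rw [Int.gcd_comm, Int.gcd_emod]

-- A's any-common-factor test agrees with B's gcd test on arguments ≥ 2
lemma cond_eq {x a : Int} (hx : 2 ≤ x) (ha : 2 ≤ a) :
    ((((pvFactors x).map (fun i => decide (i ∈ pvFactors a))).any (fun b => b)) = true)
      ↔ 1 < pvGcd x a := by
  rw [pvGcd_eq_gcd (a.natAbs) x a le_rfl (by omega) (by omega)]
  rw [List.any_map]
  simp only [List.any_eq_true, Function.comp, decide_eq_true_eq]
  constructor
  · rintro ⟨i, hix, hia⟩
    rw [mem_pvFactors] at hix hia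
    obtain ⟨h2i, _, hdx⟩ := hix
    obtain ⟨_, _, hda⟩ := hia
    have hdvd : i ∣ (Int.gcd x a : Int) := by
      rw [Int.coe_gcd]; exact dvd_gcd hdx hda
    have hpos : 0 < (Int.gcd x a : Int) := by
      have : x ≠ 0 := by omega
      exact_mod_cast Nat.pos_of_ne_zero (fun h => this (Int.eq_zero_of_gcd_eq_zero_left h))
    have := Int.le_of_dvd hpos hdvd
    omega
  · intro hg
    refine ⟨(Int.gcd x a : Int), ?_, ?_⟩
    · rw [mem_pvFactors]
      have hd : (Int.gcd x a : Int) ∣ x := by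
        rw [Int.coe_gcd]; exact gcd_dvd_left x a
      exact ⟨by omega, by have := Int.le_of_dvd (by omega) hd; omega, hd⟩
    · rw [mem_pvFactors]
      have hd : (Int.gcd x a : Int) ∣ a := by
        rw [Int.coe_gcd]; exact gcd_dvd_right x a
      exact ⟨by omega, by have := Int.le_of_dvd (by omega) hd; omega, hd⟩

-- lockstep simulation of the two loops: used = the sequence list, last = its last element,
-- idx = its length - 1; each x-trial of A corresponds to one iteration of B
lemma loop_eq (n : Int) : ∀ (fuel : Nat) (e : List Int) (x : Int) (he : e ≠ []),
    n ∉ e → 2 ≤ e.getLast he → 3 ≤ x →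
    pvLoopA n fuel e x = pvLoopB n fuel e (e.getLast he) ((e.length : Int) - 1) x := by
  intro fuel
  induction fuel with
  | zero =>
    intro e x he hn hl hx
    rw [pvLoopA, pvLoopB, if_neg hn]
  | succ f ih =>
    intro e x he hn hl hx
    rw [pvLoopA, pvLoopB, if_neg hn]
    have hcont : PySem.Set.contains e x = decide (x ∈ e) := by
      simp
    by_cases hxe : x ∈ e
    · simp only [hcont, hxe, decide_true, if_pos]
      exact ih e (x + 1) he hn hl (by omega)
    · simp only [hcont, hxe, decide_false, Bool.false_eq_true, if_false]
      rw [PySem.List.pyGetD_neg_one _ _ he]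
      by_cases hc : 1 < pvGcd x (e.getLast he)
      · rw [if_pos ((cond_eq (by omega) hl).2 hc), if_pos hc]
        by_cases hxn : x = n
        · subst hxn
          rw [pvLoopA.eq_def]
          rw [if_pos (by simp)]
          rw [if_pos rfl, PySem.List.index?_append_singleton_self (l := e) (c := x) hxe]
          simp
        · rw [if_neg hxn]
          have he' : e ++ [x] ≠ [] := by simp
          have hlast' : (e ++ [x]).getLast he' = x := by simp
          have := ih (e ++ [x]) 3 he' (by simp [hn]; omega) (by rw [hlast']; omega) (by omega)
          rw [this, hlast']
          rw [PySem.Set.add_of_not_mem hxe]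
          congr 1
          simp
      · rw [if_neg (by rw [(cond_eq (by omega) hl).not]; exact hc), if_neg hc]
        exact ih e (x + 1) he hn hl (by omega)

-- ===== VERDICT (by name: the statement is the Claim_ definition above) =====
theorem ecg_seq_index_spec : Claim_equal_ecg_seq_index := by
  intro n _
  unfold Spec_ecg_seq_index ecg_seq_index ecg_seq_index_alt
  by_cases h1 : n = 1
  · subst h1
    rw [pvLoopA.eq_def, if_pos (by decide)]
    decide
  · by_cases h2 : n = 2
    · subst h2
      rw [pvLoopA.eq_def, if_pos (by decide)]
      decide
    · have hne : ([1, 2] : List Int) ≠ [] := by simp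
      have hmem : n ∉ ([1, 2] : List Int) := by simp [h1, h2]
      have hofl : (PySem.Set.ofList [1, 2] : List Int) = [1, 2] := by decide
      rw [loop_eq n _ [1, 2] 3 hne hmem (by norm_num) (by omega), if_neg h1, if_neg h2, hofl]
      norm_num
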